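-- pv_equiv track=rewrite | github.com/jlearnph/Caesar-Cipher-Encoder-Decoder | caesar cipher.py | encrypter
-- ===== SOURCE A (Python) =====
-- def encrypter (string,steps):
--     alphabet = 'abcdefghijklmnopqrstuvwxyz'
--     numbers = '0123456789'
--     encrypted = ''
--     for i in string:
--         if i in alphabet:
--             encrypted += alphabet[(alphabet.find(str(i)) + steps) % 26]
--         elif i in alphabet.upper():
--             encrypted += alphabet[(alphabet.find(str(i.lower())) + steps) % 26].upper()
--         elif i in numbers:
--             encrypted += numbers[(numbers.find(str(i)) + steps) % 10]
--         else:
--             encrypted += i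
--     return encrypted
-- ===== SOURCE B (Python) =====
-- def encrypter(string, steps):
--     lower = 'abcdefghijklmnopqrstuvwxyz'
--     upper = lower.upper()
--     digits = '0123456789'
--     k = steps % 26
--     d = steps % 10
--     table = dict(zip(lower + upper + digits,
--                      lower[k:] + lower[:k]
--                      + upper[k:] + upper[:k]
--                      + digits[d:] + digits[:d]))
--     return ''.join(table.get(c, c) for c in string)
-- ===== Notes on version B (the rewrite author's own statement) =====
-- stated objective: faster
-- what changed: B precomputes one 62-entry translation table, dict(zip(lower+upper+digits, the three alphabets rotated by steps%26 resp. steps%10)), and replaces A's four-branch per-character membership-test/str.find/index logic with a single uniform table.get(c, c) lookup pass.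
import Mathlib
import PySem

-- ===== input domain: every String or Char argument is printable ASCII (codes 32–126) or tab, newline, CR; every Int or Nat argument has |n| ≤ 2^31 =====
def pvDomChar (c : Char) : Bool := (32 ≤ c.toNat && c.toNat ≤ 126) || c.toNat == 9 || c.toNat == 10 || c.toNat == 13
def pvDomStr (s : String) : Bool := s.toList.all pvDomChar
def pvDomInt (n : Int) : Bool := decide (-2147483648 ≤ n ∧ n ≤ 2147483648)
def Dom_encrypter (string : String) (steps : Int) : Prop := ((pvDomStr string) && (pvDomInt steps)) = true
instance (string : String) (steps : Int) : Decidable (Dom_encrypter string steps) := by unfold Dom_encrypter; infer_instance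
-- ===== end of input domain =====

-- B replaces A's four-branch per-character scan by one precomputed translation table
-- (a dict mapping the 62 alphanumeric characters to their rotations) consulted in a
-- single uniform lookup pass; objective: faster (measured).

-- ===== PORT A =====
-- Per-character body of A's loop (the if/elif chain).  `str(i)` of a 1-char string is itself;
-- `.upper()`/`.lower()` of a ONE-char string are PySem.Chars.upperChar/lowerChar; each pyGet? index
-- is (_ % 26) resp. (_ % 10), hence in range, so pyGet? is always `some` and the getD default is unreachable.
def pvStepA (i : Char) (steps : Int) : Char :=
  let alphabet := "abcdefghijklmnopqrstuvwxyz".toList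
  let numbers := "0123456789".toList
  if PySem.Chars.isIn [i] alphabet then
    (PySem.List.pyGet? alphabet (PySem.Int.mod (PySem.Chars.find alphabet [i] + steps) 26)).getD i
  else if PySem.Chars.isIn [i] (PySem.Chars.upper alphabet) then
    PySem.Chars.upperChar
      ((PySem.List.pyGet? alphabet (PySem.Int.mod (PySem.Chars.find alphabet [PySem.Chars.lowerChar i] + steps) 26)).getD i)
  else if PySem.Chars.isIn [i] numbers then
    (PySem.List.pyGet? numbers (PySem.Int.mod (PySem.Chars.find numbers [i] + steps) 10)).getD i
  else i

def encrypter (string : String) (steps : Int) : String :=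
  String.mk (string.toList.foldl (fun acc i => acc ++ [pvStepA i steps]) [])

-- ===== PORT B =====
-- Source B builds one dict:  dict(zip(lower+upper+digits, lower[k:]+lower[:k]+upper[k:]+upper[:k]+digits[d:]+digits[:d]))
-- with k = steps % 26, d = steps % 10, then maps table.get(c, c) over the string.
def encrypter_alt (string : String) (steps : Int) : String :=
  let lower := "abcdefghijklmnopqrstuvwxyz".toList
  let upper := PySem.Chars.upper lower
  let digits := "0123456789".toList
  let k := PySem.Int.mod steps 26
  let d := PySem.Int.mod steps 10
  let table := PySem.Dict.ofList
    ((lower ++ upper ++ digits).zip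
      (PySem.List.slice lower (some k) none ++ PySem.List.slice lower none (some k)
        ++ PySem.List.slice upper (some k) none ++ PySem.List.slice upper none (some k)
        ++ PySem.List.slice digits (some d) none ++ PySem.List.slice digits none (some d)))
  String.mk (string.toList.map (fun c => table.getD c c))

-- ===== PRECONDITION & SPEC =====
def Spec_encrypter (string : String) (steps : Int) (out : String) : Prop := out = encrypter_alt string steps
instance (string : String) (steps : Int) (out : String) : Decidable (Spec_encrypter string steps out) := by unfold Spec_encrypter; infer_instance

-- ===== CLAIM (what is proved, stated in full; the proofs are below) =====
def Claim_equal_encrypter : Prop := ∀ (string : String) (steps : Int), Dom_encrypter string steps → Spec_encrypter string steps (encrypter string steps)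

-- ===== LEMMAS AND PROOFS =====

-- proof-side names for the three source alphabets, their rotations and the table
def pvLowL : List Char := ['a', 'b', 'c', 'd', 'e', 'f', 'g', 'h', 'i', 'j', 'k', 'l', 'm', 'n', 'o', 'p', 'q', 'r', 's', 't', 'u', 'v', 'w', 'x', 'y', 'z']
def pvUpL : List Char := ['A', 'B', 'C', 'D', 'E', 'F', 'G', 'H', 'I', 'J', 'K', 'L', 'M', 'N', 'O', 'P', 'Q', 'R', 'S', 'T', 'U', 'V', 'W', 'X', 'Y', 'Z']
def pvDigL : List Char := ['0', '1', '2', '3', '4', '5', '6', '7', '8', '9']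
def pvRot (l : List Char) (k : Nat) : List Char := l.drop k ++ l.take k
def pvKeys : List Char := pvLowL ++ pvUpL ++ pvDigL
def pvVals (kn dn : Nat) : List Char := pvRot pvLowL kn ++ pvRot pvUpL kn ++ pvRot pvDigL dn
def pvTbl (kn dn : Nat) : List (Char × Char) := pvKeys.zip (pvVals kn dn)
def pvLookup (steps : Int) (c : Char) : Char :=
  ((List.find? (fun p => p.1 == c)
      (pvTbl (PySem.Int.mod steps 26).toNat (PySem.Int.mod steps 10).toNat)).map (fun x => x.2)).getD c

theorem pvLowLit : "abcdefghijklmnopqrstuvwxyz".toList = pvLowL := by decide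
theorem pvDigLit : "0123456789".toList = pvDigL := by decide
theorem pvUpperLit : PySem.Chars.upper pvLowL = pvUpL := by decide

theorem pvValsLen (kn dn : Nat) (hk : kn < 26) (hd : dn < 10) : (pvVals kn dn).length = 62 := by
  simp [pvVals, pvRot, pvLowL, pvUpL, pvDigL]; omega

theorem pvRotLowLen (kn : Nat) (hk : kn ≤ 26) : (pvRot pvLowL kn).length = 26 := by
  simp [pvRot, pvLowL]; omega
theorem pvRotUpLen (kn : Nat) (hk : kn ≤ 26) : (pvRot pvUpL kn).length = 26 := by
  simp [pvRot, pvUpL]; omega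

-- indexing the literal alphabets at an in-range Nat position
theorem pvGetLow : ∀ k : Nat, k < 26 →
    PySem.List.pyGet? pvLowL ((k : Nat) : Int) = some (Char.ofNat (97 + k)) := by decide
theorem pvGetDig : ∀ k : Nat, k < 10 →
    PySem.List.pyGet? pvDigL ((k : Nat) : Int) = some (Char.ofNat (48 + k)) := by decide
theorem pvUpChar : ∀ k : Nat, k < 26 →
    PySem.Chars.upperChar (Char.ofNat (97 + k)) = Char.ofNat (65 + k) := by decide

-- indexing a rotated alphabet
theorem pvRotLowGet : ∀ kn : Nat, kn < 26 → ∀ j : Nat, j < 26 →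
    (pvRot pvLowL kn).getD j ' ' = Char.ofNat (97 + (j + kn) % 26) := by decide
theorem pvRotUpGet : ∀ kn : Nat, kn < 26 → ∀ j : Nat, j < 26 →
    (pvRot pvUpL kn).getD j ' ' = Char.ofNat (65 + (j + kn) % 26) := by decide
theorem pvRotDigGet : ∀ dn : Nat, dn < 10 → ∀ j : Nat, j < 10 →
    (pvRot pvDigL dn).getD j ' ' = Char.ofNat (48 + (j + dn) % 10) := by decide

-- first-match lookup in a zipped association list
theorem pvZipFind : ∀ (jf : Nat) (keys vals : List Char) (c : Char),
    (keys.take jf).all (fun x => x != c) = true →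
    jf < keys.length → jf < vals.length →
    keys.getD jf ' ' = c →
    List.find? (fun p => p.1 == c) (keys.zip vals) = some (c, vals.getD jf ' ') := by
  intro jf
  induction jf with
  | zero =>
    intro keys vals c hpre hk hv hc
    match keys, vals with
    | k :: ks, v :: vs =>
      simp only [List.getD_cons_zero] at hc
      subst hc
      simp [List.zip_cons_cons]
  | succ n ih =>
    intro keys vals c hpre hk hv hc
    match keys, vals with
    | k :: ks, v :: vs =>
      simp only [List.take_succ_cons, List.all_cons, Bool.and_eq_true, bne_iff_ne] at hpre
      simp only [List.getD_cons_succ] at hc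
      have hkc : (k == c) = false := by simp [hpre.1]
      simp only [List.zip_cons_cons, List.find?_cons, hkc, List.getD_cons_succ]
      exact ih ks vs c hpre.2 (by simpa using hk) (by simpa using hv) hc

theorem pvZipFindNone : ∀ (keys vals : List Char) (c : Char),
    keys.all (fun x => x != c) = true →
    List.find? (fun p => p.1 == c) (keys.zip vals) = none := by
  intro keys
  induction keys with
  | nil => intro vals c _; simp
  | cons k ks ih =>
    intro vals c hall
    simp only [List.all_cons, Bool.and_eq_true, bne_iff_ne] at hall
    match vals with
    | [] => simp [List.zip_nil_right]
    | v :: vs =>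
      have hkc : (k == c) = false := by simp [hall.1]
      simp only [List.zip_cons_cons, List.find?_cons, hkc]
      exact ih vs c hall.2

-- a dict built from pairs with distinct keys has exactly those items
theorem pvItemsOfList (ps : List (Char × Char)) (h : (ps.map Prod.fst).Nodup) :
    (PySem.Dict.ofList ps).items = ps := by
  have := PySem.Dict.items_foldl_insert_fresh ps Prod.fst Prod.snd PySem.Dict.empty
    (by intro a _; simp [PySem.Dict.contains_empty]) h
  simpa [PySem.Dict.ofList, PySem.Dict.update] using this

-- the four character classes: A's branch value = the table lookup
theorem pvCaseLowT (steps : Int) (kn dn : Nat)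
    (hkm : PySem.Int.mod steps 26 = (kn : Int)) (hk : kn < 26) (hd : dn < 10)
    (c : Char) (hj : c.toNat - 97 < 26)
    (h1 : PySem.Chars.isIn [c] pvLowL = true)
    (hf : PySem.Chars.find pvLowL [c] = ((c.toNat - 97 : Nat) : Int))
    (hpre : (pvKeys.take (c.toNat - 97)).all (fun x => x != c) = true)
    (hgj : pvKeys.getD (c.toNat - 97) ' ' = c) :
    pvStepA c steps = ((List.find? (fun p => p.1 == c) (pvTbl kn dn)).map (fun x => x.2)).getD c := by
  set j : Nat := c.toNat - 97 with hjdef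
  -- B side
  rw [pvTbl, pvZipFind j pvKeys (pvVals kn dn) c hpre (by simp [pvKeys, pvLowL, pvUpL, pvDigL]; omega)
        (by rw [pvValsLen kn dn hk hd]; omega) hgj]
  have hL := pvRotLowLen kn (by omega)
  have hU := pvRotUpLen kn (by omega)
  have hvv : (pvVals kn dn).getD j ' ' = Char.ofNat (97 + (j + kn) % 26) := by
    rw [pvVals, List.getD_append _ _ _ j (by rw [List.length_append, hL, hU]; omega),
        List.getD_append _ _ _ j (by rw [hL]; omega)]
    exact pvRotLowGet kn hk j hj
  -- A side
  simp only [pvStepA, pvLowLit, pvDigLit, pvUpperLit]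
  rw [if_pos h1, hf]
  set m : Int := PySem.Int.mod (((j : Nat) : Int) + steps) 26 with hm
  have hm0 : 0 ≤ m := PySem.Int.mod_nonneg _ (by norm_num)
  have hmlt : m < 26 := PySem.Int.mod_lt _ (by norm_num)
  obtain ⟨k', hk'⟩ : ∃ k' : Nat, m = (k' : Int) := ⟨m.toNat, (Int.toNat_of_nonneg hm0).symm⟩
  have hk'lt : k' < 26 := by omega
  rw [hk', pvGetLow k' hk'lt]
  simp only [Option.getD_some, Option.map_some, hvv]
  have hme : m = (((j : Nat) : Int) + steps) % 26 := by
    rw [hm, PySem.Int.mod_eq_emod_of_pos (by norm_num)]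
  have hkme : (kn : Int) = steps % 26 := by
    rw [← hkm, PySem.Int.mod_eq_emod_of_pos (by norm_num)]
  congr 1
  omega

theorem pvCaseUpT (steps : Int) (kn dn : Nat)
    (hkm : PySem.Int.mod steps 26 = (kn : Int)) (hk : kn < 26) (hd : dn < 10)
    (c : Char) (hj : c.toNat - 65 < 26)
    (h1 : PySem.Chars.isIn [c] pvLowL = false)
    (h2 : PySem.Chars.isIn [c] pvUpL = true)
    (hf : PySem.Chars.find pvLowL [PySem.Chars.lowerChar c] = ((c.toNat - 65 : Nat) : Int))
    (hpre : (pvKeys.take (26 + (c.toNat - 65))).all (fun x => x != c) = true)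
    (hgj : pvKeys.getD (26 + (c.toNat - 65)) ' ' = c) :
    pvStepA c steps = ((List.find? (fun p => p.1 == c) (pvTbl kn dn)).map (fun x => x.2)).getD c := by
  set j : Nat := c.toNat - 65 with hjdef
  rw [pvTbl, pvZipFind (26 + j) pvKeys (pvVals kn dn) c hpre (by simp [pvKeys, pvLowL, pvUpL, pvDigL]; omega)
        (by rw [pvValsLen kn dn hk hd]; omega) hgj]
  have hL := pvRotLowLen kn (by omega)
  have hU := pvRotUpLen kn (by omega)
  have hvv : (pvVals kn dn).getD (26 + j) ' ' = Char.ofNat (65 + (j + kn) % 26) := by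
    rw [pvVals, List.getD_append _ _ _ (26 + j) (by rw [List.length_append, hL, hU]; omega),
        List.getD_append_right _ _ _ (26 + j) (by rw [hL]; omega)]
    have hidx : 26 + j - (pvRot pvLowL kn).length = j := by rw [hL]; omega
    rw [hidx]
    exact pvRotUpGet kn hk j hj
  simp only [pvStepA, pvLowLit, pvDigLit, pvUpperLit]
  rw [if_neg (by simp [h1]), if_pos h2, hf]
  set m : Int := PySem.Int.mod (((j : Nat) : Int) + steps) 26 with hm
  have hm0 : 0 ≤ m := PySem.Int.mod_nonneg _ (by norm_num)
  have hmlt : m < 26 := PySem.Int.mod_lt _ (by norm_num)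
  obtain ⟨k', hk'⟩ : ∃ k' : Nat, m = (k' : Int) := ⟨m.toNat, (Int.toNat_of_nonneg hm0).symm⟩
  have hk'lt : k' < 26 := by omega
  rw [hk', pvGetLow k' hk'lt]
  simp only [Option.getD_some, Option.map_some, hvv]
  rw [pvUpChar k' hk'lt]
  have hme : m = (((j : Nat) : Int) + steps) % 26 := by
    rw [hm, PySem.Int.mod_eq_emod_of_pos (by norm_num)]
  have hkme : (kn : Int) = steps % 26 := by
    rw [← hkm, PySem.Int.mod_eq_emod_of_pos (by norm_num)]
  congr 1
  omega

theorem pvCaseDigT (steps : Int) (kn dn : Nat)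
    (hdm : PySem.Int.mod steps 10 = (dn : Int)) (hk : kn < 26) (hd : dn < 10)
    (c : Char) (hj : c.toNat - 48 < 10)
    (h1 : PySem.Chars.isIn [c] pvLowL = false)
    (h2 : PySem.Chars.isIn [c] pvUpL = false)
    (h3 : PySem.Chars.isIn [c] pvDigL = true)
    (hf : PySem.Chars.find pvDigL [c] = ((c.toNat - 48 : Nat) : Int))
    (hpre : (pvKeys.take (52 + (c.toNat - 48))).all (fun x => x != c) = true)
    (hgj : pvKeys.getD (52 + (c.toNat - 48)) ' ' = c) :
    pvStepA c steps = ((List.find? (fun p => p.1 == c) (pvTbl kn dn)).map (fun x => x.2)).getD c := by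
  set j : Nat := c.toNat - 48 with hjdef
  rw [pvTbl, pvZipFind (52 + j) pvKeys (pvVals kn dn) c hpre (by simp [pvKeys, pvLowL, pvUpL, pvDigL]; omega)
        (by rw [pvValsLen kn dn hk hd]; omega) hgj]
  have hL := pvRotLowLen kn (by omega)
  have hU := pvRotUpLen kn (by omega)
  have hvv : (pvVals kn dn).getD (52 + j) ' ' = Char.ofNat (48 + (j + dn) % 10) := by
    rw [pvVals, List.getD_append_right _ _ _ (52 + j) (by rw [List.length_append, hL, hU]; omega)]
    have hidx : 52 + j - (pvRot pvLowL kn ++ pvRot pvUpL kn).length = j := by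
      rw [List.length_append, hL, hU]; omega
    rw [hidx]
    exact pvRotDigGet dn hd j hj
  simp only [pvStepA, pvLowLit, pvDigLit, pvUpperLit]
  rw [if_neg (by simp [h1]), if_neg (by simp [h2]), if_pos h3, hf]
  set m : Int := PySem.Int.mod (((j : Nat) : Int) + steps) 10 with hm
  have hm0 : 0 ≤ m := PySem.Int.mod_nonneg _ (by norm_num)
  have hmlt : m < 10 := PySem.Int.mod_lt _ (by norm_num)
  obtain ⟨k', hk'⟩ : ∃ k' : Nat, m = (k' : Int) := ⟨m.toNat, (Int.toNat_of_nonneg hm0).symm⟩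
  have hk'lt : k' < 10 := by omega
  rw [hk', pvGetDig k' hk'lt]
  simp only [Option.getD_some, Option.map_some, hvv]
  have hme : m = (((j : Nat) : Int) + steps) % 10 := by
    rw [hm, PySem.Int.mod_eq_emod_of_pos (by norm_num)]
  have hdme : (dn : Int) = steps % 10 := by
    rw [← hdm, PySem.Int.mod_eq_emod_of_pos (by norm_num)]
  congr 1
  omega

theorem pvCaseOtherT (steps : Int) (kn dn : Nat) (c : Char)
    (h1 : PySem.Chars.isIn [c] pvLowL = false)
    (h2 : PySem.Chars.isIn [c] pvUpL = false)
    (h3 : PySem.Chars.isIn [c] pvDigL = false)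
    (hall : pvKeys.all (fun x => x != c) = true) :
    pvStepA c steps = ((List.find? (fun p => p.1 == c) (pvTbl kn dn)).map (fun x => x.2)).getD c := by
  rw [pvTbl, pvZipFindNone pvKeys (pvVals kn dn) c hall]
  simp only [Option.map_none, Option.getD_none]
  simp only [pvStepA, pvLowLit, pvDigLit, pvUpperLit]
  rw [if_neg (by simp [h1]), if_neg (by simp [h2]), if_neg (by simp [h3])]

-- the 98 characters of the input domain (codes 9, 10, 13, 32..126)
def pvAsciiList : List Char :=
  ['\t', '\n', '\r', ' ', '!', '"', '#', '$', '%', '&', '\'', '(',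
  ')', '*', '+', ',', '-', '.', '/', '0', '1', '2', '3', '4',
  '5', '6', '7', '8', '9', ':', ';', '<', '=', '>', '?', '@',
  'A', 'B', 'C', 'D', 'E', 'F', 'G', 'H', 'I', 'J', 'K', 'L',
  'M', 'N', 'O', 'P', 'Q', 'R', 'S', 'T', 'U', 'V', 'W', 'X',
  'Y', 'Z', '[', '\\', ']', '^', '_', '`', 'a', 'b', 'c', 'd',
  'e', 'f', 'g', 'h', 'i', 'j', 'k', 'l', 'm', 'n', 'o', 'p',
  'q', 'r', 's', 't', 'u', 'v', 'w', 'x', 'y', 'z', '{', '|',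
  '}', '~']

theorem pvMemAscii (c : Char) (hc : pvDomChar c = true) : c ∈ pvAsciiList := by
  have key : ∀ n : Nat, n < 127 → pvDomChar (Char.ofNat n) = true → Char.ofNat n ∈ pvAsciiList := by decide
  have hlt : c.toNat < 127 := by
    simp only [pvDomChar, Bool.or_eq_true, Bool.and_eq_true, decide_eq_true_eq, beq_iff_eq] at hc
    omega
  have := key c.toNat hlt (by rw [Char.ofNat_toNat]; exact hc)
  rwa [Char.ofNat_toNat] at this

set_option maxHeartbeats 4000000 in
theorem pvStep_eq (c : Char) (hc : pvDomChar c = true) (steps : Int) :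
    pvStepA c steps = pvLookup steps c := by
  set kn : Nat := (PySem.Int.mod steps 26).toNat with hkn
  set dn : Nat := (PySem.Int.mod steps 10).toNat with hdn
  have hkm : PySem.Int.mod steps 26 = (kn : Int) :=
    (Int.toNat_of_nonneg (PySem.Int.mod_nonneg _ (by norm_num))).symm
  have hdm : PySem.Int.mod steps 10 = (dn : Int) :=
    (Int.toNat_of_nonneg (PySem.Int.mod_nonneg _ (by norm_num))).symm
  have hk : kn < 26 := by
    have := PySem.Int.mod_lt steps (b := 26) (by norm_num)
    have h0 := PySem.Int.mod_nonneg steps (b := 26) (by norm_num)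
    omega
  have hd : dn < 10 := by
    have := PySem.Int.mod_lt steps (b := 10) (by norm_num)
    have h0 := PySem.Int.mod_nonneg steps (b := 10) (by norm_num)
    omega
  show pvStepA c steps = ((List.find? (fun p => p.1 == c) (pvTbl kn dn)).map (fun x => x.2)).getD c
  have hmem := pvMemAscii c hc
  fin_cases hmem <;>
    first
      | exact pvCaseLowT steps kn dn hkm hk hd _ (by decide) (by decide) (by decide) (by decide) (by decide)
      | exact pvCaseUpT steps kn dn hkm hk hd _ (by decide) (by decide) (by decide) (by decide) (by decide) (by decide)
      | exact pvCaseDigT steps kn dn hdm hk hd _ (by decide) (by decide) (by decide) (by decide) (by decide) (by decide) (by decide)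
      | exact pvCaseOtherT steps kn dn _ (by decide) (by decide) (by decide) (by decide)

-- B's port computes pvLookup character-wise
theorem pvAlt_eq (s : String) (steps : Int) :
    encrypter_alt s steps = String.mk (s.toList.map (fun c => pvLookup steps c)) := by
  unfold encrypter_alt
  dsimp only
  rw [pvLowLit, pvUpperLit, pvDigLit]
  rw [show PySem.Int.mod steps 26 = (((PySem.Int.mod steps 26).toNat : Nat) : Int) from
        (Int.toNat_of_nonneg (PySem.Int.mod_nonneg _ (by norm_num))).symm,
      show PySem.Int.mod steps 10 = (((PySem.Int.mod steps 10).toNat : Nat) : Int) from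
        (Int.toNat_of_nonneg (PySem.Int.mod_nonneg _ (by norm_num))).symm]
  rw [PySem.List.slice_from_natCast, PySem.List.slice_to_natCast,
      PySem.List.slice_from_natCast, PySem.List.slice_to_natCast,
      PySem.List.slice_from_natCast, PySem.List.slice_to_natCast]
  have hk : (PySem.Int.mod steps 26).toNat < 26 := by
    have := PySem.Int.mod_lt steps (b := 26) (by norm_num)
    have h0 := PySem.Int.mod_nonneg steps (b := 26) (by norm_num)
    omega
  have hd : (PySem.Int.mod steps 10).toNat < 10 := by
    have := PySem.Int.mod_lt steps (b := 10) (by norm_num)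
    have h0 := PySem.Int.mod_nonneg steps (b := 10) (by norm_num)
    omega
  have hpairs : (pvLowL ++ pvUpL ++ pvDigL).zip
      (pvLowL.drop (PySem.Int.mod steps 26).toNat ++ pvLowL.take (PySem.Int.mod steps 26).toNat
        ++ pvUpL.drop (PySem.Int.mod steps 26).toNat ++ pvUpL.take (PySem.Int.mod steps 26).toNat
        ++ pvDigL.drop (PySem.Int.mod steps 10).toNat ++ pvDigL.take (PySem.Int.mod steps 10).toNat)
      = pvTbl (PySem.Int.mod steps 26).toNat (PySem.Int.mod steps 10).toNat := by
    rw [pvTbl, pvKeys, pvVals, pvRot, pvRot, pvRot]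
    congr 1
    simp [List.append_assoc]
  rw [hpairs]
  have hnd : ((pvTbl (PySem.Int.mod steps 26).toNat (PySem.Int.mod steps 10).toNat).map Prod.fst).Nodup := by
    rw [pvTbl, List.map_fst_zip (by rw [pvValsLen _ _ hk hd]; decide)]
    decide
  have hitems := pvItemsOfList _ hnd
  congr 1
  apply List.map_congr_left
  intro c _
  simp only [PySem.Dict.getD, PySem.Dict.get?, hitems, pvLookup]

-- ===== VERDICT (by name: the statement is the Claim_ definition above) =====
theorem encrypter_spec : Claim_equal_encrypter := by
  unfold Claim_equal_encrypter
  intro s steps hdom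
  unfold Spec_encrypter encrypter
  rw [pvAlt_eq]
  rw [PySem.List.foldl_append_singleton_eq_map (fun i => pvStepA i steps) s.toList []]
  simp only [List.nil_append]
  congr 1
  apply List.map_congr_left
  intro c hcmem
  have hc : pvDomChar c = true := by
    unfold Dom_encrypter pvDomStr at hdom
    rw [Bool.and_eq_true] at hdom
    exact List.all_eq_true.mp hdom.1 c hcmem
  exact pvStep_eq c hc steps
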